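-- pv_equiv track=rewrite | github.com/sz012/ASD-AGH | Exams/2425 (mine)/1/B/egz1B.py | critical
-- ===== SOURCE A (Python) =====
-- from collections import deque
-- from collections import defaultdict
--
-- def graph_change(E):
--     graph = defaultdict(list)
--     for i in range(len(E)):
--         graph[E[i][0]].append(E[i][1])
--     return graph
--
-- def bfs_modified(graph, start, deleted):
--     visited = set()
--     queue = deque()
--
--     visited.add(start)
--     queue.append(start)
--     order = []
--
--     while queue:
--         s = queue.popleft()
--         order.append(s)
--
--         for neighbor in graph[s]:
--             if (s, neighbor) == deleted:
--                 continue
--             if neighbor not in visited: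
--                 visited.add(neighbor)
--                 queue.append(neighbor)
--     return order
--
-- def critical(V, E):
--     graph = graph_change(E)
--
--     ctr = 0
--     for e in E:
--         v = 0
--         while v <= V:
--             old_order = bfs_modified(graph, v, None)
--             new_order = bfs_modified(graph, v, e)
--             if len(new_order) < len(old_order):
--                 ctr += 1
--                 break
--             v += 1
--     return ctr
-- ===== SOURCE B (Python) =====
-- def _build_adj(pairs):
--     adj = {}
--     for a, b in pairs:
--         adj.setdefault(a, []).append(b)
--     return adj
--
-- def _reach(adj, start, ban):
--     seen = {start}
--     stack = [start]
--     while stack: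
--         s = stack.pop()
--         for t in adj.get(s, ()):
--             if (s, t) != ban and t not in seen:
--                 seen.add(t)
--                 stack.append(t)
--     return seen
--
-- def critical(V, E):
--     radj = _build_adj([(b, a) for (a, b) in E])
--     ctr = 0
--     for (u, w) in E:
--         to_u = _reach(radj, u, (w, u))
--         to_w = _reach(radj, w, (w, u))
--         if any(0 <= x <= V and x not in to_w for x in to_u):
--             ctr += 1
--     return ctr
-- ===== Notes on version B (the rewrite author's own statement) =====
-- stated objective: faster
-- what changed: Instead of trying every start vertex 0..V with two full BFS runs per (edge, start) pair, B builds the reversed graph once and, per edge (u,w), runs two stack-based traversals of the reversed graph with the edge removed (vertices reaching u, vertices reaching w) and counts the edge iff some vertex in [0,V] reaches u but not w.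
import Mathlib
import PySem

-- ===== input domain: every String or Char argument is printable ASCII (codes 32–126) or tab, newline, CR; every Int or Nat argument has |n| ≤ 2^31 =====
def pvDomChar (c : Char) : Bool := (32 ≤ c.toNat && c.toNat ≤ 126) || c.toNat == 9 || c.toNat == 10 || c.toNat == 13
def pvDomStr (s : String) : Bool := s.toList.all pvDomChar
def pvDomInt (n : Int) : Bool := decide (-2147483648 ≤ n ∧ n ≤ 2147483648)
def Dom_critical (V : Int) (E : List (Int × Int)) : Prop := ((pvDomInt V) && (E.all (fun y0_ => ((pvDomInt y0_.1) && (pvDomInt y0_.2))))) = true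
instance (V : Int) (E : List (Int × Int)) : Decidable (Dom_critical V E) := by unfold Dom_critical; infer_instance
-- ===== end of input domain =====

-- B re-implements A with two reverse-graph traversals per edge (critical iff some start in [0,V]
-- reaches u but not w in G - e) instead of A's loop over all V+1 starts with two BFS runs each;
-- objective: faster (asymptotic: the V+1 factor per edge disappears).

-- ===== PORT A =====
-- graph_change: "for i in range(len(E)): graph[E[i][0]].append(E[i][1])" (defaultdict(list))
def graphChange (E : List (Int × Int)) : PySem.Dict Int (List Int) :=
  (PySem.List.pyRange 0 (PySem.List.len E) 1).foldl
    (fun g i =>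
      (fun p => g.insert p.1 (g.getD p.1 [] ++ [p.2])) (PySem.List.pyGetD E i (0, 0)))
    PySem.Dict.empty

-- inner loop of bfs_modified: "for neighbor in graph[s]: if (s,neighbor)==deleted: continue; ..."
-- state = (visited, queue)
def bfsStep (del : Option (Int × Int)) (s : Int) (st : PySem.Set Int × List Int) (t : Int) :
    PySem.Set Int × List Int :=
  if some (s, t) = del then st
  else if t ∈ st.1 then st
  else (PySem.Set.add st.1 t, st.2 ++ [t])

-- "while queue: s = queue.popleft(); order.append(s); <inner loop>"
-- fuel is a totality guard only: each iteration pops one of the at most |values|+1 ever-enqueued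
-- vertices, so the fuel below is never exhausted (proved in bfsLoop_spec).
def bfsLoop (g : PySem.Dict Int (List Int)) (del : Option (Int × Int)) :
    Nat → PySem.Set Int → List Int → List Int → PySem.Set Int × List Int
  | 0, vis, _, order => (vis, order)
  | _ + 1, vis, [], order => (vis, order)
  | fuel + 1, vis, s :: rest, order =>
    let st := (g.getD s []).foldl (bfsStep del s) (vis, rest)
    bfsLoop g del fuel st.1 st.2 (order ++ [s])

def bfsFuel (g : PySem.Dict Int (List Int)) : Nat := g.values.flatten.length + 2

-- bfs_modified returns `order`
def bfsModified (g : PySem.Dict Int (List Int)) (start : Int) (del : Option (Int × Int)) :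
    List Int :=
  (bfsLoop g del (bfsFuel g) (PySem.Set.ofList [start]) [start] []).2

-- "v = 0; while v <= V: ...; if len(new) < len(old): ctr += 1; break; v += 1"
-- (break ported as a Bool-returning helper; fuel (V+2).toNat covers every iteration v = 0..V+1)
def criticalLoop (g : PySem.Dict Int (List Int)) (V : Int) (e : Int × Int) :
    Nat → Int → Bool
  | 0, _ => false
  | fuel + 1, v =>
    if v ≤ V then
      if (bfsModified g v (some e)).length < (bfsModified g v none).length then true
      else criticalLoop g V e fuel (v + 1)
    else false

def critical (V : Int) (E : List (Int × Int)) : Int :=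
  let g := graphChange E
  E.foldl (fun ctr e => if criticalLoop g V e (V + 2).toNat 0 then ctr + 1 else ctr) 0

-- ===== PORT B =====
-- _build_adj: "for a, b in pairs: adj.setdefault(a, []).append(b)"
def buildAdj (ps : List (Int × Int)) : PySem.Dict Int (List Int) :=
  ps.foldl (fun d p => d.insert p.1 (d.getD p.1 [] ++ [p.2])) PySem.Dict.empty

-- inner loop of _reach: "for t in adj.get(s, ()): if (s, t) != ban and t not in seen: ..."
-- state = (seen, stack)
def reachStep (ban : Int × Int) (s : Int) (st : PySem.Set Int × List Int) (t : Int) :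
    PySem.Set Int × List Int :=
  if (s, t) ≠ ban ∧ t ∉ st.1 then (PySem.Set.add st.1 t, st.2 ++ [t]) else st

-- "while stack: s = stack.pop(); <inner loop>"  (pop from the END; fuel = totality guard as above)
def reachLoop (adj : PySem.Dict Int (List Int)) (ban : Int × Int) :
    Nat → PySem.Set Int → List Int → PySem.Set Int
  | 0, seen, _ => seen
  | fuel + 1, seen, stack =>
    match stack.getLast? with
    | none => seen
    | some s => let st := (adj.getD s []).foldl (reachStep ban s) (seen, stack.dropLast)
                reachLoop adj ban fuel st.1 st.2

def reachFuel (adj : PySem.Dict Int (List Int)) : Nat := adj.values.flatten.length + 2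

def reach (adj : PySem.Dict Int (List Int)) (start : Int) (ban : Int × Int) : PySem.Set Int :=
  reachLoop adj ban (reachFuel adj) (PySem.Set.ofList [start]) [start]

def critical_alt (V : Int) (E : List (Int × Int)) : Int :=
  let radj := buildAdj (E.map (fun p => (p.2, p.1)))
  E.foldl (fun ctr e =>
    let toU := reach radj e.1 (e.2, e.1)
    let toW := reach radj e.2 (e.2, e.1)
    if toU.any (fun x => decide (0 ≤ x ∧ x ≤ V) && !(PySem.Set.contains toW x)) then ctr + 1
    else ctr) 0

-- ===== PRECONDITION & SPEC =====
def Spec_critical (V : Int) (E : List (Int × Int)) (out : Int) : Prop := out = critical_alt V E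
instance (V : Int) (E : List (Int × Int)) (out : Int) : Decidable (Spec_critical V E out) := by unfold Spec_critical; infer_instance

-- ===== CLAIM (what is proved, stated in full; the proofs are below) =====
def Claim_equal_critical : Prop := ∀ (V : Int) (E : List (Int × Int)), Dom_critical V E → Spec_critical V E (critical V E)

-- ===== LEMMAS AND PROOFS =====

-- The allowed-step relation of a traversal over adjacency dict g with an optionally deleted edge.
def Step (g : PySem.Dict Int (List Int)) (del : Option (Int × Int)) (a b : Int) : Prop :=
  b ∈ g.getD a [] ∧ some (a, b) ≠ del

-- The edge relation both ports' traversals realise (on g = buildAdj of the edge list).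
def EStep (E : List (Int × Int)) (del : Option (Int × Int)) (a b : Int) : Prop :=
  (a, b) ∈ E ∧ some (a, b) ≠ del

theorem rtg_congr {r r' : Int → Int → Prop} (h : ∀ a b, r a b ↔ r' a b) (a b : Int) :
    Relation.ReflTransGen r a b ↔ Relation.ReflTransGen r' a b :=
  ⟨Relation.ReflTransGen.mono (fun a b hr => (h a b).1 hr),
   Relation.ReflTransGen.mono (fun a b hr => (h a b).2 hr)⟩

-- both inner-loop step functions in canonical guarded-append form
theorem bfsStep_funext (del : Option (Int × Int)) (s : Int) :
    bfsStep del s = fun st t =>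
      if some (s, t) ≠ del ∧ t ∉ st.1 then (st.1 ++ [t], st.2 ++ [t]) else st := by
  funext st t
  unfold bfsStep
  by_cases h1 : some (s, t) = del <;> by_cases h2 : t ∈ st.1 <;>
    simp [h1, h2, PySem.Set.add_of_not_mem]

theorem reachStep_funext (ban : Int × Int) (s : Int) :
    reachStep ban s = fun st t =>
      if some (s, t) ≠ some ban ∧ t ∉ st.1 then (st.1 ++ [t], st.2 ++ [t]) else st := by
  funext st t
  unfold reachStep
  by_cases h1 : (s, t) = ban <;> by_cases h2 : t ∈ st.1 <;>
    simp [h1, h2, PySem.Set.add_of_not_mem]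

-- what one inner loop (over the neighbour list ts of s) does to (visited, worklist)
theorem fold_new (ok : Int → Prop) [DecidablePred ok] (ts : List Int) :
    ∀ (vis q : List Int),
      ∃ new : List Int,
        ts.foldl (fun st t => if ok t ∧ t ∉ st.1 then (st.1 ++ [t], st.2 ++ [t]) else st) (vis, q)
            = (vis ++ new, q ++ new) ∧
          new.Nodup ∧ (∀ x ∈ new, x ∉ vis ∧ x ∈ ts ∧ ok x) ∧
          (∀ t ∈ ts, ok t → t ∈ vis ++ new) := by
  induction ts with
  | nil =>
    intro vis q
    exact ⟨[], by simp, List.nodup_nil, by simp, by simp⟩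
  | cons t ts ih =>
    intro vis q
    simp only [List.foldl_cons]
    by_cases h : ok t ∧ t ∉ vis
    · rw [if_pos h]
      obtain ⟨new', h1, h2, h3, h4⟩ := ih (vis ++ [t]) (q ++ [t])
      refine ⟨t :: new', ?_, ?_, ?_, ?_⟩
      · rw [h1]; simp
      · refine List.nodup_cons.2 ⟨?_, h2⟩
        intro hmem
        exact (h3 t hmem).1 (by simp)
      · intro x hx
        rcases List.mem_cons.1 hx with rfl | hx'
        · exact ⟨h.2, by simp, h.1⟩
        · obtain ⟨hnv, hts, hok⟩ := h3 x hx'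
          exact ⟨fun hc => hnv (by simp [hc]), by simp [hts], hok⟩
      · intro t' ht' hok'
        rcases List.mem_cons.1 ht' with rfl | ht''
        · simp
        · have := h4 t' ht'' hok'
          simp only [List.mem_append, List.mem_cons] at this ⊢
          tauto
    · rw [if_neg h]
      obtain ⟨new, h1, h2, h3, h4⟩ := ih vis q
      refine ⟨new, h1, h2, ?_, ?_⟩
      · intro x hx
        obtain ⟨a, b, c⟩ := h3 x hx
        exact ⟨a, by simp [b], c⟩
      · intro t' ht' hok'
        rcases List.mem_cons.1 ht' with rfl | ht''
        · have hv : t' ∈ vis := by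
            by_contra hc
            exact h ⟨hok', hc⟩
          simp [hv]
        · exact h4 t' ht'' hok' 

-- every neighbour list is inside the flattened value lists of the dict
theorem getD_subset_flatten (g : PySem.Dict Int (List Int)) (s t : Int)
    (h : t ∈ g.getD s []) : t ∈ g.values.flatten := by
  rw [PySem.Dict.getD_eq_get?_getD] at h
  cases hg : g.get? s with
  | none => rw [hg] at h; simp at h
  | some l =>
    rw [hg] at h
    simp only [Option.getD_some] at h
    have hi : (s, l) ∈ g.items := PySem.Dict.mem_items_of_get?_eq_some g hg
    have hv : l ∈ g.values := by
      simp only [PySem.Dict.values]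
      exact List.mem_map.2 ⟨(s, l), hi, rfl⟩
    exact List.mem_flatten.2 ⟨l, hv, h⟩

-- number of not-yet-visited slots in the flattened value lists
def unvis (g : PySem.Dict Int (List Int)) (vis : List Int) : Nat :=
  (g.values.flatten.filter (fun t => decide (t ∉ vis))).length

theorem unvis_drop (vals vis new : List Int) (hnd : new.Nodup)
    (hsub : ∀ x ∈ new, x ∈ vals ∧ x ∉ vis) :
    (vals.filter (fun t => decide (t ∉ vis ++ new))).length + new.length ≤
      (vals.filter (fun t => decide (t ∉ vis))).length := by
  classical
  simp only [decide_not]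
  have hpart := List.length_eq_countP_add_countP (fun x => decide (x ∈ new))
    (l := vals.filter (fun t => !decide (t ∈ vis)))
  simp only [decide_not, decide_eq_true_eq] at hpart
  have h1 : new.length ≤
      (vals.filter (fun t => !decide (t ∈ vis))).countP (fun x => decide (x ∈ new)) := by
    rw [List.countP_eq_length_filter]
    refine List.Subperm.length_le (List.subperm_of_subset hnd ?_)
    intro x hx
    rw [List.mem_filter, List.mem_filter]
    obtain ⟨hv, hnvz⟩ := hsub x hx
    exact ⟨⟨hv, by simpa using hnvz⟩, by simpa using hx⟩
  have h2 : (vals.filter (fun t => !decide (t ∈ vis))).countP (fun a => !decide (a ∈ new)) =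
      (vals.filter (fun t => !decide (t ∈ vis ++ new))).length := by
    rw [List.countP_eq_length_filter, List.filter_filter]
    congr 1
    apply List.filter_congr
    intro x _
    simp [List.mem_append, Bool.and_comm]
  omega

theorem bfsLoop_spec (g : PySem.Dict Int (List Int)) (del : Option (Int × Int)) (start : Int) :
    ∀ (fuel : Nat) (vis queue order : List Int),
      (∀ x ∈ queue, x ∈ vis) →
      (∀ x ∈ vis, Relation.ReflTransGen (Step g del) start x) →
      (∀ x ∈ vis, x ∉ queue → ∀ t, Step g del x t → t ∈ vis) →
      (∀ x, x ∈ vis ↔ x ∈ order ++ queue) →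
      (order ++ queue).Nodup →
      unvis g vis + queue.length < fuel →
      (∀ x ∈ vis, x ∈ (bfsLoop g del fuel vis queue order).1) ∧
        (∀ x ∈ (bfsLoop g del fuel vis queue order).1,
          Relation.ReflTransGen (Step g del) start x) ∧
        (∀ x ∈ (bfsLoop g del fuel vis queue order).1, ∀ t, Step g del x t →
          t ∈ (bfsLoop g del fuel vis queue order).1) ∧
        (bfsLoop g del fuel vis queue order).2.Nodup ∧
        (∀ x, x ∈ (bfsLoop g del fuel vis queue order).2 ↔
          x ∈ (bfsLoop g del fuel vis queue order).1) := by
  intro fuel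
  induction fuel with
  | zero =>
    intro vis queue order _ _ _ _ _ h6
    exact absurd h6 (by omega)
  | succ fuel ih =>
    intro vis queue order h1 h2 h3 h4 h5 h6
    cases queue with
    | nil =>
      simp only [bfsLoop]
      refine ⟨fun x hx => hx, h2, ?_, ?_, ?_⟩
      · intro x hx t hst
        exact h3 x hx (by simp) t hst
      · simpa using h5
      · intro x
        have := h4 x
        simp only [List.append_nil] at this
        exact this.symm
    | cons s rest =>
      obtain ⟨new, hfold, hnd, hprop, hcl⟩ :=
        fold_new (fun t => some (s, t) ≠ del) (g.getD s []) vis rest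
      simp only [bfsLoop, bfsStep_funext]
      rw [hfold]
      have hsv : s ∈ vis := h1 s (by simp)
      have hA1 : ∀ x ∈ rest ++ new, x ∈ vis ++ new := by
        intro x hx
        rcases List.mem_append.1 hx with hx' | hx'
        · exact List.mem_append_left _ (h1 x (by simp [hx']))
        · exact List.mem_append_right _ hx'
      have hA2 : ∀ x ∈ vis ++ new, Relation.ReflTransGen (Step g del) start x := by
        intro x hx
        rcases List.mem_append.1 hx with hx' | hx'
        · exact h2 x hx'
        · obtain ⟨_, hts, hok⟩ := hprop x hx'
          exact Relation.ReflTransGen.tail (h2 s hsv) ⟨hts, hok⟩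
      have hA3 : ∀ x ∈ vis ++ new, x ∉ rest ++ new →
          ∀ t, Step g del x t → t ∈ vis ++ new := by
        intro x hx hnx t hst
        rcases List.mem_append.1 hx with hx' | hx'
        · by_cases hxs : x = s
          · subst hxs
            exact hcl t hst.1 hst.2
          · have hxq : x ∉ s :: rest := by
              intro hc
              rcases List.mem_cons.1 hc with rfl | hc'
              · exact hxs rfl
              · exact hnx (List.mem_append_left _ hc')
            exact List.mem_append_left _ (h3 x hx' hxq t hst)
        · exact absurd (List.mem_append_right rest hx') hnx
      have hA4 : ∀ x, x ∈ vis ++ new ↔ x ∈ (order ++ [s]) ++ (rest ++ new) := by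
        intro x
        have := h4 x
        simp only [List.mem_append, List.mem_cons] at this ⊢
        tauto
      have hA5 : ((order ++ [s]) ++ (rest ++ new)).Nodup := by
        have heq : (order ++ [s]) ++ (rest ++ new) = (order ++ s :: rest) ++ new := by
          simp
        rw [heq]
        refine List.Nodup.append h5 hnd ?_
        intro a ha hb
        exact (hprop a hb).1 ((h4 a).2 ha)
      have hA6 : unvis g (vis ++ new) + (rest ++ new).length < fuel := by
        have hdrop := unvis_drop g.values.flatten vis new hnd
          (fun x hx => ⟨getD_subset_flatten g s x (hprop x hx).2.1, (hprop x hx).1⟩)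
        simp only [unvis] at hdrop h6 ⊢
        simp only [List.length_cons, List.length_append] at h6 ⊢
        omega
      obtain ⟨c1, c2, c3, c4, c5⟩ := ih (vis ++ new) (rest ++ new) (order ++ [s])
        hA1 hA2 hA3 hA4 hA5 hA6
      exact ⟨fun x hx => c1 x (List.mem_append_left _ hx), c2, c3, c4, c5⟩

theorem reachLoop_concat (adj : PySem.Dict Int (List Int)) (ban : Int × Int) (fuel : Nat)
    (seen rest : List Int) (s : Int) :
    reachLoop adj ban (fuel + 1) seen (rest ++ [s]) =
      reachLoop adj ban fuel
        ((adj.getD s []).foldl (reachStep ban s) (seen, rest)).1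
        ((adj.getD s []).foldl (reachStep ban s) (seen, rest)).2 := by
  simp only [reachLoop]
  rw [List.getLast?_concat, List.dropLast_concat]

theorem reachLoop_spec (adj : PySem.Dict Int (List Int)) (ban : Int × Int) (start : Int) :
    ∀ (fuel : Nat) (seen stack : List Int),
      (∀ x ∈ stack, x ∈ seen) →
      (∀ x ∈ seen, Relation.ReflTransGen (Step adj (some ban)) start x) →
      (∀ x ∈ seen, x ∉ stack → ∀ t, Step adj (some ban) x t → t ∈ seen) →
      stack.Nodup →
      unvis adj seen + stack.length < fuel →
      (∀ x ∈ seen, x ∈ reachLoop adj ban fuel seen stack) ∧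
        (∀ x ∈ reachLoop adj ban fuel seen stack,
          Relation.ReflTransGen (Step adj (some ban)) start x) ∧
        (∀ x ∈ reachLoop adj ban fuel seen stack, ∀ t, Step adj (some ban) x t →
          t ∈ reachLoop adj ban fuel seen stack) := by
  intro fuel
  induction fuel with
  | zero =>
    intro seen stack _ _ _ _ h6
    exact absurd h6 (by omega)
  | succ fuel ih =>
    intro seen stack h1 h2 h3 h5 h6
    rcases List.eq_nil_or_concat stack with rfl | ⟨rest, s, rfl⟩
    · simp only [reachLoop, List.getLast?_nil]
      refine ⟨fun x hx => hx, h2, ?_⟩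
      intro x hx t hst
      exact h3 x hx (by simp) t hst
    · simp only [List.concat_eq_append] at h1 h3 h5 h6 ⊢
      obtain ⟨new, hfold, hnd, hprop, hcl⟩ :=
        fold_new (fun t => some (s, t) ≠ some ban) (adj.getD s []) seen rest
      rw [reachLoop_concat]
      simp only [reachStep_funext]
      rw [hfold]
      have hsv : s ∈ seen := h1 s (by simp)
      have hrest : ∀ x ∈ rest, x ∈ seen := fun x hx => h1 x (by simp [hx])
      have hA1 : ∀ x ∈ rest ++ new, x ∈ seen ++ new := by
        intro x hx
        rcases List.mem_append.1 hx with hx' | hx'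
        · exact List.mem_append_left _ (hrest x hx')
        · exact List.mem_append_right _ hx'
      have hA2 : ∀ x ∈ seen ++ new, Relation.ReflTransGen (Step adj (some ban)) start x := by
        intro x hx
        rcases List.mem_append.1 hx with hx' | hx'
        · exact h2 x hx'
        · obtain ⟨_, hts, hok⟩ := hprop x hx'
          exact Relation.ReflTransGen.tail (h2 s hsv) ⟨hts, hok⟩
      have hA3 : ∀ x ∈ seen ++ new, x ∉ rest ++ new →
          ∀ t, Step adj (some ban) x t → t ∈ seen ++ new := by
        intro x hx hnx t hst
        rcases List.mem_append.1 hx with hx' | hx'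
        · by_cases hxs : x = s
          · subst hxs
            exact hcl t hst.1 hst.2
          · have hxq : x ∉ rest ++ [s] := by
              intro hc
              rcases List.mem_append.1 hc with hc' | hc'
              · exact hnx (List.mem_append_left _ hc')
              · exact hxs (by simpa using hc')
            exact List.mem_append_left _ (h3 x hx' hxq t hst)
        · exact absurd (List.mem_append_right rest hx') hnx
      have hA5 : (rest ++ new).Nodup := by
        have hr : rest.Nodup := (List.nodup_append.1 h5).1
        refine List.Nodup.append hr hnd ?_
        intro a ha hb
        exact (hprop a hb).1 (hrest a ha)
      have hA6 : unvis adj (seen ++ new) + (rest ++ new).length < fuel := by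
        have hdrop := unvis_drop adj.values.flatten seen new hnd
          (fun x hx => ⟨getD_subset_flatten adj s x (hprop x hx).2.1, (hprop x hx).1⟩)
        simp only [unvis] at hdrop h6 ⊢
        simp only [List.length_append, List.length_cons, List.length_nil] at h6 ⊢
        omega
      obtain ⟨c1, c2, c3⟩ := ih (seen ++ new) (rest ++ new) hA1 hA2 hA3 hA5 hA6
      exact ⟨fun x hx => c1 x (List.mem_append_left _ hx), c2, c3⟩

theorem ofList_singleton (x : Int) : PySem.Set.ofList [x] = [x] := by
  simp [PySem.Set.ofList_eq_self_of_nodup]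

-- characterisation of A's bfs_modified order list
theorem mem_bfs (g : PySem.Dict Int (List Int)) (start : Int) (del : Option (Int × Int)) :
    (bfsModified g start del).Nodup ∧
      ∀ x, x ∈ bfsModified g start del ↔ Relation.ReflTransGen (Step g del) start x := by
  obtain ⟨hmono, hreach, hclosed, hnodup, hmem⟩ :=
    bfsLoop_spec g del start (bfsFuel g) [start] [start] []
      (by simp)
      (by intro x hx; simp only [List.mem_singleton] at hx; subst hx; exact .refl)
      (by intro x hx hnx; simp only [List.mem_singleton] at hx; subst hx; simp at hnx)
      (by intro x; simp)
      (by simp)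
      (by
        have := List.length_filter_le (fun t => decide (t ∉ [start])) g.values.flatten
        simp only [unvis, bfsFuel, List.length_singleton]
        omega)
  unfold bfsModified
  rw [ofList_singleton]
  refine ⟨hnodup, fun x => ?_⟩
  rw [hmem]
  constructor
  · exact hreach x
  · intro hx
    induction hx with
    | refl => exact hmono start (by simp)
    | tail hab step ih => exact hclosed _ ih _ step

-- characterisation of B's _reach set
theorem mem_reach (adj : PySem.Dict Int (List Int)) (start : Int) (ban : Int × Int) :
    ∀ x, x ∈ reach adj start ban ↔ Relation.ReflTransGen (Step adj (some ban)) start x := by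
  obtain ⟨hmono, hreach, hclosed⟩ :=
    reachLoop_spec adj ban start (reachFuel adj) [start] [start]
      (by simp)
      (by intro x hx; simp only [List.mem_singleton] at hx; subst hx; exact .refl)
      (by intro x hx hnx; simp only [List.mem_singleton] at hx; subst hx; simp at hnx)
      (by simp)
      (by
        have := List.length_filter_le (fun t => decide (t ∉ [start])) adj.values.flatten
        simp only [unvis, reachFuel, List.length_singleton]
        omega)
  unfold reach
  rw [ofList_singleton]
  intro x
  constructor
  · exact hreach x
  · intro hx
    induction hx with
    | refl => exact hmono start (by simp)
    | tail hab step ih => exact hclosed _ ih _ step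

-- adjacency-build characterisations
theorem getD_foldl_insert_append (ps : List (Int × Int)) :
    ∀ (d : PySem.Dict Int (List Int)) (s t : Int),
      (t ∈ (ps.foldl (fun d p => d.insert p.1 (d.getD p.1 [] ++ [p.2])) d).getD s [] ↔
        t ∈ d.getD s [] ∨ (s, t) ∈ ps) := by
  induction ps with
  | nil => simp
  | cons p ps ih =>
    intro d s t
    simp only [List.foldl_cons]
    rw [ih]
    rw [PySem.Dict.getD_insert]
    by_cases hs : s = p.1
    · subst hs
      simp [List.mem_append, Prod.ext_iff, List.mem_cons]
      try tauto
    · simp [hs, Prod.ext_iff, List.mem_cons]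
      try tauto

theorem getD_buildAdj (ps : List (Int × Int)) (s t : Int) :
    t ∈ (buildAdj ps).getD s [] ↔ (s, t) ∈ ps := by
  have := getD_foldl_insert_append ps PySem.Dict.empty s t
  simpa [buildAdj, PySem.Dict.getD_empty] using this

theorem graphChange_eq (E : List (Int × Int)) : graphChange E = buildAdj E := by
  unfold graphChange buildAdj
  exact PySem.List.foldl_pyRange_zero_pyGetD E (0, 0)
    (fun g p => g.insert p.1 (g.getD p.1 [] ++ [p.2])) PySem.Dict.empty

theorem step_graphChange (E : List (Int × Int)) (del : Option (Int × Int)) (a b : Int) :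
    Step (graphChange E) del a b ↔ EStep E del a b := by
  rw [graphChange_eq]
  unfold Step EStep
  rw [getD_buildAdj]

theorem step_radj (E : List (Int × Int)) (u w a b : Int) :
    Step (buildAdj (E.map (fun p => (p.2, p.1)))) (some (w, u)) a b ↔
      EStep E (some (u, w)) b a := by
  unfold Step EStep
  rw [getD_buildAdj]
  constructor
  · rintro ⟨h1, h2⟩
    rcases List.mem_map.1 h1 with ⟨p, hp, hpe⟩
    cases p
    cases hpe
    refine ⟨hp, ?_⟩
    intro hc
    injection hc with hc
    apply h2
    cases hc
    rfl
  · rintro ⟨h1, h2⟩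
    refine ⟨List.mem_map.2 ⟨(b, a), h1, rfl⟩, ?_⟩
    intro hc
    injection hc with hc
    apply h2
    cases hc
    rfl

-- set-cardinality comparison of two nodup lists characterised by predicates
theorem length_lt_iff (o n : List Int) (P Q : Int → Prop) (ho : o.Nodup) (hn : n.Nodup)
    (hoP : ∀ x, x ∈ o ↔ P x) (hnQ : ∀ x, x ∈ n ↔ Q x) (hQP : ∀ x, Q x → P x) :
    (n.length < o.length ↔ ∃ x, P x ∧ ¬ Q x) := by
  have hsub : n ⊆ o := fun x hx => (hoP x).2 (hQP x ((hnQ x).1 hx))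
  constructor
  · intro hlt
    by_contra hc
    push Not at hc
    have hos : o ⊆ n := fun x hx => (hnQ x).2 (hc x ((hoP x).1 hx))
    exact absurd (List.Subperm.length_le (List.subperm_of_subset ho hos)) (by omega)
  · rintro ⟨x, hP, hQ⟩
    have hxo : x ∈ o := (hoP x).2 hP
    have hxn : x ∉ n := fun hm => hQ ((hnQ x).1 hm)
    have h1 : n.toFinset ⊂ o.toFinset := by
      rw [Finset.ssubset_iff_of_subset (fun y hy => List.mem_toFinset.2 (hsub (List.mem_toFinset.1 hy)))]
      exact ⟨x, List.mem_toFinset.2 hxo, fun hc => hxn (List.mem_toFinset.1 hc)⟩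
    have := Finset.card_lt_card h1
    rwa [List.toFinset_card_of_nodup hn, List.toFinset_card_of_nodup ho] at this

-- any vertex reachable in the full graph is reachable with (u,w) removed,
-- provided w is already (u,w)-free reachable or u is not
theorem full_sub_del (E : List (Int × Int)) (u w v : Int)
    (h : Relation.ReflTransGen (EStep E (some (u, w))) v w ∨
      ¬ Relation.ReflTransGen (EStep E (some (u, w))) v u) :
    ∀ x, Relation.ReflTransGen (EStep E none) v x →
      Relation.ReflTransGen (EStep E (some (u, w))) v x := by
  intro x hx
  induction hx with
  | refl => exact .refl
  | @tail b c hab step ih =>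
    by_cases hbc : (b, c) = (u, w)
    · have hb : b = u := congrArg Prod.fst hbc
      have hc : c = w := congrArg Prod.snd hbc
      subst hb; subst hc
      rcases h with hw | hu
      · exact hw
      · exact absurd ih hu
    · exact Relation.ReflTransGen.tail ih ⟨step.1, by simp only [ne_eq, Option.some.injEq]; exact hbc⟩

-- the mathematical core: reachability from v shrinks when (u,w) is removed iff
-- v still reaches u but no longer w
theorem exists_lost_iff (E : List (Int × Int)) (u w v : Int) (he : (u, w) ∈ E) :
    (∃ x, Relation.ReflTransGen (EStep E none) v x ∧
        ¬ Relation.ReflTransGen (EStep E (some (u, w))) v x) ↔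
      (Relation.ReflTransGen (EStep E (some (u, w))) v u ∧
        ¬ Relation.ReflTransGen (EStep E (some (u, w))) v w) := by
  constructor
  · rintro ⟨x, hRx, hR'x⟩
    by_cases hw : Relation.ReflTransGen (EStep E (some (u, w))) v w
    · exact absurd (full_sub_del E u w v (Or.inl hw) x hRx) hR'x
    · by_cases hu : Relation.ReflTransGen (EStep E (some (u, w))) v u
      · exact ⟨hu, hw⟩
      · exact absurd (full_sub_del E u w v (Or.inr hu) x hRx) hR'x
  · rintro ⟨hu, hw⟩
    refine ⟨w, ?_, hw⟩
    have hRu : Relation.ReflTransGen (EStep E none) v u :=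
      Relation.ReflTransGen.mono (fun a b hab => ⟨hab.1, by simp⟩) hu
    exact Relation.ReflTransGen.tail hRu ⟨he, by simp⟩

theorem criticalLoop_iff (g : PySem.Dict Int (List Int)) (V : Int) (e : Int × Int) :
    ∀ (fuel : Nat) (v0 : Int), V + 1 - v0 ≤ (fuel : Int) →
      (criticalLoop g V e fuel v0 = true ↔
        ∃ v, v0 ≤ v ∧ v ≤ V ∧
          (bfsModified g v (some e)).length < (bfsModified g v none).length) := by
  intro fuel
  induction fuel with
  | zero =>
    intro v0 hb
    simp only [criticalLoop]
    constructor
    · intro h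
      exact absurd h (by simp)
    · rintro ⟨v, hv1, hv2, _⟩
      exfalso
      simp only [Nat.cast_zero] at hb
      omega
  | succ fuel ih =>
    intro v0 hb
    simp only [criticalLoop]
    by_cases hv : v0 ≤ V
    · rw [if_pos hv]
      by_cases hc : (bfsModified g v0 (some e)).length < (bfsModified g v0 none).length
      · rw [if_pos hc]
        simp only [true_iff]
        exact ⟨v0, le_refl _, hv, hc⟩
      · rw [if_neg hc]
        rw [ih (v0 + 1) (by push_cast at hb ⊢; omega)]
        constructor
        · rintro ⟨v, hv1, hv2, hv3⟩
          exact ⟨v, by omega, hv2, hv3⟩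
        · rintro ⟨v, hv1, hv2, hv3⟩
          refine ⟨v, ?_, hv2, hv3⟩
          rcases eq_or_lt_of_le hv1 with rfl | hlt
          · exact absurd hv3 hc
          · omega
    · rw [if_neg hv]
      constructor
      · intro h
        exact absurd h (by simp)
      · rintro ⟨v, hv1, hv2, _⟩
        omega

-- per-edge agreement of the two Bool conditions
theorem cond_eq (V : Int) (E : List (Int × Int)) (e : Int × Int) (he : e ∈ E) :
    criticalLoop (graphChange E) V e (V + 2).toNat 0 =
      ((reach (buildAdj (E.map (fun p => (p.2, p.1)))) e.1 (e.2, e.1)).any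
        (fun x => decide (0 ≤ x ∧ x ≤ V) &&
          !(PySem.Set.contains (reach (buildAdj (E.map (fun p => (p.2, p.1)))) e.2 (e.2, e.1)) x))) := by
  obtain ⟨u, w⟩ := e
  have he' : (u, w) ∈ E := he
  have hg : ∀ (del : Option (Int × Int)) (v x : Int),
      x ∈ bfsModified (graphChange E) v del ↔ Relation.ReflTransGen (EStep E del) v x := by
    intro del v x
    rw [(mem_bfs (graphChange E) v del).2 x]
    exact rtg_congr (step_graphChange E del) v x
  have hshrink : ∀ v : Int,
      ((bfsModified (graphChange E) v (some (u, w))).length <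
          (bfsModified (graphChange E) v none).length ↔
        (Relation.ReflTransGen (EStep E (some (u, w))) v u ∧
          ¬ Relation.ReflTransGen (EStep E (some (u, w))) v w)) := by
    intro v
    rw [length_lt_iff (bfsModified (graphChange E) v none)
        (bfsModified (graphChange E) v (some (u, w)))
        (Relation.ReflTransGen (EStep E none) v)
        (Relation.ReflTransGen (EStep E (some (u, w))) v)
        (mem_bfs _ v none).1 (mem_bfs _ v (some (u, w))).1
        (fun x => hg none v x) (fun x => hg _ v x)
        (fun x => Relation.ReflTransGen.mono (fun a b hab => ⟨hab.1, by simp⟩))]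
    exact exists_lost_iff E u w v he'
  have hrev : ∀ (z x : Int),
      x ∈ reach (buildAdj (E.map (fun p => (p.2, p.1)))) z (w, u) ↔
        Relation.ReflTransGen (EStep E (some (u, w))) x z := by
    intro z x
    rw [mem_reach _ z (w, u) x]
    rw [rtg_congr (step_radj E u w) z x]
    exact Relation.reflTransGen_swap
  rw [Bool.eq_iff_iff]
  rw [criticalLoop_iff (graphChange E) V (u, w) (V + 2).toNat 0 (by omega)]
  rw [List.any_eq_true]
  constructor
  · rintro ⟨v, hv0, hvV, hlt⟩
    obtain ⟨hu, hw⟩ := (hshrink v).1 hlt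
    refine ⟨v, (hrev u v).2 hu, ?_⟩
    rw [Bool.and_eq_true, decide_eq_true_iff, Bool.not_eq_true']
    refine ⟨⟨hv0, hvV⟩, ?_⟩
    rw [← Bool.not_eq_true, PySem.Set.contains_iff]
    intro hc
    exact hw ((hrev w v).1 hc)
  · rintro ⟨x, hxu, hx⟩
    rw [Bool.and_eq_true, decide_eq_true_iff, Bool.not_eq_true'] at hx
    obtain ⟨⟨hx0, hxV⟩, hnc⟩ := hx
    refine ⟨x, hx0, hxV, (hshrink x).2 ⟨(hrev u x).1 hxu, ?_⟩⟩
    intro hc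
    rw [← Bool.not_eq_true, PySem.Set.contains_iff] at hnc
    exact hnc ((hrev w x).2 hc)

-- ===== VERDICT (by name: the statement is the Claim_ definition above) =====
theorem critical_spec : Claim_equal_critical := by
  intro V E _
  show critical V E = critical_alt V E
  show E.foldl (fun ctr e =>
      if criticalLoop (graphChange E) V e (V + 2).toNat 0 then ctr + 1 else ctr) 0 =
    E.foldl (fun ctr e =>
      if (reach (buildAdj (E.map (fun p => (p.2, p.1)))) e.1 (e.2, e.1)).any
          (fun x => decide (0 ≤ x ∧ x ≤ V) &&
            !(PySem.Set.contains (reach (buildAdj (E.map (fun p => (p.2, p.1)))) e.2 (e.2, e.1)) x))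
        then ctr + 1 else ctr) 0
  apply PySem.List.foldl_congr_mem
  intro ctr e hme
  rw [cond_eq V E e hme]
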